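-- pv_equiv track=rewrite | github.com/beto-an/code | CS50/CS50x/sentimental-readability/readability.py | countText
-- ===== SOURCE A (Python) =====
-- def countText(text):
--     counter = [0 for i in range(3)]
--     for c in text:
--         if (c == ' '):
--             counter[0] += 1
--         elif (isEnding(c)):
--             counter[1] += 1
--         elif (isLetter(c)):
--             counter[2] += 1
--     counter[0] += 1
--     return counter
--
-- def isLetter(c):
--     if (c >= 'A' and c <= 'Z'):
--         return True
--     if (c >= 'a' and c <= 'z'):
--         return True
--     return False
--
-- def isEnding(c):
--     if (c == '.' or c == '!' or c == '?'):
--         return True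
--     return False
-- ===== SOURCE B (Python) =====
-- LETTERS = 'ABCDEFGHIJKLMNOPQRSTUVWXYZabcdefghijklmnopqrstuvwxyz'
--
-- def countText(text):
--     cnt = {}
--     for c in text:
--         cnt[c] = cnt.get(c, 0) + 1
--     return [cnt.get(' ', 0) + 1,
--             cnt.get('.', 0) + cnt.get('!', 0) + cnt.get('?', 0),
--             sum(cnt.get(c, 0) for c in LETTERS)]
-- ===== Notes on version B (the rewrite author's own statement) =====
-- stated objective: idiomatic
-- what changed: A's branching single pass that mutates a 3-slot list by index is replaced by building one character-frequency table and then assembling the three results from table lookups (spaces, the three sentence-ending chars, and a sum over the 52 ASCII letters).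
import Mathlib
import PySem

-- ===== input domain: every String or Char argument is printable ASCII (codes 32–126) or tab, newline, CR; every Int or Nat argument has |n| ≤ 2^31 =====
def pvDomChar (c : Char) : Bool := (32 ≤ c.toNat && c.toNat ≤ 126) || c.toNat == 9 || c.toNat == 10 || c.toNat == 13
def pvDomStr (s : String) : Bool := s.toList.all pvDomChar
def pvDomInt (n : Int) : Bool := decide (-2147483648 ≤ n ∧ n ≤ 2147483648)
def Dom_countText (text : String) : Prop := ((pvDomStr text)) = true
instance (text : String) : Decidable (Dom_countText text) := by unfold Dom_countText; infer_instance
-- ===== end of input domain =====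

set_option maxRecDepth 8000

-- B builds one frequency table and assembles the three counts from lookups instead of A's
-- branching single pass with list-index updates (objective: more idiomatic, same cost).

-- ===== PORT A =====
def pvIsLetter (c : Char) : Bool :=
  if 'A' ≤ c ∧ c ≤ 'Z' then true
  else if 'a' ≤ c ∧ c ≤ 'z' then true
  else false

def pvIsEnding (c : Char) : Bool :=
  if c = '.' ∨ c = '!' ∨ c = '?' then true
  else false

def countText (text : String) : List Int :=
  let counter : List Int := (List.range 3).map (fun _ => 0)
  let counter := text.toList.foldl (fun counter c =>
    if c = ' ' then counter.set 0 (counter.getD 0 0 + 1)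
    else if pvIsEnding c then counter.set 1 (counter.getD 1 0 + 1)
    else if pvIsLetter c then counter.set 2 (counter.getD 2 0 + 1)
    else counter) counter
  counter.set 0 (counter.getD 0 0 + 1)

-- ===== PORT B =====
def pvLetters : String := "ABCDEFGHIJKLMNOPQRSTUVWXYZabcdefghijklmnopqrstuvwxyz"

def countText_alt (text : String) : List Int :=
  let cnt : PySem.Dict Char Int :=
    text.toList.foldl (fun d c => d.insert c (d.getD c 0 + 1)) PySem.Dict.empty
  [cnt.getD ' ' 0 + 1,
   cnt.getD '.' 0 + cnt.getD '!' 0 + cnt.getD '?' 0,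
   (pvLetters.toList.map (fun c => cnt.getD c 0)).sum]

-- ===== PRECONDITION & SPEC =====
def Spec_countText (text : String) (out : List Int) : Prop := out = countText_alt text
instance (text : String) (out : List Int) : Decidable (Spec_countText text out) := by unfold Spec_countText; infer_instance

-- ===== CLAIM (what is proved, stated in full; the proofs are below) =====
def Claim_equal_countText : Prop := ∀ (text : String), Dom_countText text → Spec_countText text (countText text)

-- ===== LEMMAS AND PROOFS =====
theorem lettersList : pvLetters.toList = ['A', 'B', 'C', 'D', 'E', 'F', 'G', 'H', 'I', 'J', 'K', 'L', 'M', 'N', 'O', 'P', 'Q', 'R', 'S', 'T', 'U', 'V', 'W', 'X', 'Y', 'Z', 'a', 'b', 'c', 'd', 'e', 'f', 'g', 'h', 'i', 'j', 'k', 'l', 'm', 'n', 'o', 'p', 'q', 'r', 's', 't', 'u', 'v', 'w', 'x', 'y', 'z'] := by decide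

theorem contains_letters (c : Char) : pvLetters.toList.contains c = pvIsLetter c := by
  rw [lettersList]
  simp only [List.contains, List.elem_eq_mem, List.mem_cons, List.not_mem_nil, or_false,
    pvIsLetter, Char.le_def, UInt32.le_iff_toNat_le, Char.ext_iff, UInt32.ext_iff]
  have h : ∀ d : Char, d.val.toNat = d.toNat := fun _ => rfl
  simp only [h, Char.reduceToNat]
  split_ifs with h1 h2 <;> simp <;> omega

theorem ending_not_letter {c : Char} (h : pvIsEnding c = true) : pvIsLetter c = false := by
  by_cases hc : c = '.' ∨ c = '!' ∨ c = '?'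
  · rcases hc with rfl | rfl | rfl <;> decide
  · simp [pvIsEnding, hc] at h

theorem ending_split (x : Char) : (if pvIsEnding x = true then 1 else 0 : Nat)
    = ((if x == '.' then 1 else 0) + (if x == '!' then 1 else 0) + (if x == '?' then 1 else 0)) := by
  by_cases h1 : x = '.'
  · subst h1; decide
  by_cases h2 : x = '!'
  · subst h2; decide
  by_cases h3 : x = '?'
  · subst h3; decide
  simp [pvIsEnding, h1, h2, h3]

theorem countP_ending (cs : List Char) :
    cs.countP pvIsEnding = cs.count '.' + cs.count '!' + cs.count '?' := by
  induction cs with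
  | nil => simp
  | cons x t ih =>
    simp only [List.countP_cons, List.count_cons, ih, ending_split]
    omega

theorem foldA (cs : List Char) (a b k : Int) :
    cs.foldl (fun counter c =>
      if c = ' ' then counter.set 0 (counter.getD 0 0 + 1)
      else if pvIsEnding c then counter.set 1 (counter.getD 1 0 + 1)
      else if pvIsLetter c then counter.set 2 (counter.getD 2 0 + 1)
      else counter) [a, b, k]
    = [a + (cs.count ' ' : Int), b + (cs.countP pvIsEnding : Int), k + (cs.countP pvIsLetter : Int)] := by
  induction cs generalizing a b k with
  | nil => simp
  | cons x t ih =>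
    rw [List.foldl_cons]
    by_cases h1 : x = ' '
    · subst h1
      rw [if_pos rfl]
      have hs : ([a, b, k].set 0 ([a, b, k].getD 0 0 + 1)) = [a + 1, b, k] := by
        simp [List.getD]
      rw [hs, ih]
      have hE : pvIsEnding ' ' = false := by decide
      have hL : pvIsLetter ' ' = false := by decide
      simp [hE, hL]
      ring
    · rw [if_neg h1]
      by_cases h2 : pvIsEnding x = true
      · rw [if_pos h2]
        have hs : ([a, b, k].set 1 ([a, b, k].getD 1 0 + 1)) = [a, b + 1, k] := by
          simp [List.getD]
        rw [hs, ih]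
        have hx : (x == ' ') = false := by simp [h1]
        simp [List.count_cons, hx, h2, ending_not_letter h2]
        ring
      · rw [if_neg (by simp [h2])]
        by_cases h3 : pvIsLetter x = true
        · rw [if_pos h3]
          have hs : ([a, b, k].set 2 ([a, b, k].getD 2 0 + 1)) = [a, b, k + 1] := by
            simp [List.getD]
          rw [hs, ih]
          have hx : (x == ' ') = false := by simp [h1]
          simp [List.count_cons, hx, h2, h3]
          ring
        · rw [if_neg (by simp [h3]), ih]
          have hx : (x == ' ') = false := by simp [h1]
          simp [List.count_cons, hx, h2, h3]

theorem countP_orb (p q : Char → Bool) (cs : List Char) (hd : ∀ x, ¬(p x = true ∧ q x = true)) :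
    cs.countP (fun x => p x || q x) = cs.countP p + cs.countP q := by
  induction cs with
  | nil => simp
  | cons x t ih =>
    simp only [List.countP_cons, ih]
    cases hp : p x <;> cases hq : q x <;> simp <;> first | omega | exact absurd (And.intro hp hq) (hd x)

theorem sum_counts_int (L : List Char) (cs : List Char) (h : L.Nodup) :
    (L.map (fun c => (cs.count c : Int))).sum = (cs.countP (fun x => L.contains x) : Int) := by
  induction L with
  | nil => simp [List.countP_eq_zero.mpr]
  | cons c t ih =>
    rcases List.nodup_cons.mp h with ⟨hc, ht⟩
    have hcongr : ∀ x ∈ cs, (t.contains x || x == c) = ((c :: t).contains x) := by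
      intro x _
      have hb : (x == c) = decide (x = c) := by
        cases hxc : x == c
        · simp [(beq_iff_eq (a := x) (b := c)).not.mp (by simp [hxc])]
        · simp [beq_iff_eq.mp hxc]
      simp [Bool.or_comm, hb]
    have hd : ∀ x, ¬((t.contains x) = true ∧ (x == c) = true) := by
      intro x hx
      rcases hx with ⟨hx1, hx2⟩
      rw [beq_iff_eq] at hx2; subst hx2
      exact hc (by simpa using hx1)
    calc (List.map (fun c => (cs.count c : Int)) (c :: t)).sum
        = (cs.count c : Int) + (t.map (fun c => (cs.count c : Int))).sum := by simp
      _ = (cs.count c : Int) + (cs.countP (fun x => t.contains x) : Int) := by rw [ih ht]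
      _ = ((cs.countP (fun x => t.contains x) + cs.countP (fun x => x == c) : Nat) : Int) := by
          push_cast; simp [List.count]
          ring
      _ = (cs.countP (fun x => (c :: t).contains x) : Int) := by
          rw [← countP_orb _ _ _ hd, List.countP_congr (fun x hx => by rw [hcongr x hx])]

-- ===== VERDICT (by name: the statement is the Claim_ definition above) =====
theorem countText_spec : Claim_equal_countText := by
  intro text _
  unfold Spec_countText
  simp only [countText, countText_alt]
  rw [show ((List.range 3).map (fun _ => (0:Int))) = [0, 0, 0] from rfl, foldA]
  simp only [PySem.Dict.getD_foldl_insert_add_one, PySem.Dict.getD_empty, zero_add]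
  have hnodup : pvLetters.toList.Nodup := by rw [lettersList]; decide
  have hlet : text.toList.countP (fun x => pvLetters.toList.contains x) = text.toList.countP pvIsLetter :=
    List.countP_congr (fun x _ => by rw [contains_letters x])
  rw [sum_counts_int _ _ hnodup, hlet]
  have hE := countP_ending text.toList
  simp [List.getD]
  omega
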